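-- pv_equiv track=rewrite | github.com/bili256355/easm_project01 | stage_partition/V7/src/stage_partition_v7/field_timing.py | _extract_log_evidence
-- ===== SOURCE A (Python) =====
-- def _extract_log_evidence(log_text: str, keywords: list[str], context: int = 2) -> str:
--     lines = log_text.splitlines()
--     selected: set[int] = set()
--     for i, line in enumerate(lines):
--         if any(k in line for k in keywords):
--             for j in range(max(0, i - context), min(len(lines), i + context + 1)):
--                 selected.add(j)
--     if not selected:
--         return ""
--     return "\n".join(lines[i] for i in sorted(selected))
-- ===== SOURCE B (Python) =====
-- def _extract_log_evidence(log_text: str, keywords: list[str], context: int = 2) -> str: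
--     # Pull-based: precompute per-line match flags once, then keep each line whose
--     # context window contains a matching line; emits in order, no set, no sort.
--     lines = log_text.splitlines()
--     flags = [any(k in line for k in keywords) for line in lines]
--     kept = [line for j, line in enumerate(lines)
--             if any(flags[max(0, j - context):max(0, j + context + 1)])]
--     return "\n".join(kept)
-- ===== Notes on version B (the rewrite author's own statement) =====
-- stated objective: simpler
-- what changed: A pushes each matching line's context window into a set of indices and then sorts it; B computes per-line match flags once and keeps each line iff any flag lies in its context window, emitting lines in order with no set and no sort.
import Mathlib
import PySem

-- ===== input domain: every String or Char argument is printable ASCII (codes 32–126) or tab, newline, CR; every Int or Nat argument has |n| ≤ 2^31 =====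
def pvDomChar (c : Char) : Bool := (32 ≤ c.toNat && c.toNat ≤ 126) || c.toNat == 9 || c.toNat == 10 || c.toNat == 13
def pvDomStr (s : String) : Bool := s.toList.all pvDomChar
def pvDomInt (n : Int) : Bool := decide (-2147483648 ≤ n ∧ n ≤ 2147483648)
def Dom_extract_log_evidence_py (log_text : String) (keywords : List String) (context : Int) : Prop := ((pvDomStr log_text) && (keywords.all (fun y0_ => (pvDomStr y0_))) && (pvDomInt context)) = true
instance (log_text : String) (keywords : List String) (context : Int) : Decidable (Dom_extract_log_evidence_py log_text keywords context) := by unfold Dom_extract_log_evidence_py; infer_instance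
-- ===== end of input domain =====

-- B replaces A's push-style "mark a set of indices around each matching line, then sort"
-- with a pull-style single ordered pass: per-line match flags computed once, then each line
-- is kept iff its context window contains a flag (objective: simpler — no set, no sort).

-- ===== PORT A =====
def extract_log_evidence_py (log_text : String) (keywords : List String) (context : Int) : String :=
  let lines := PySem.Str.splitlines log_text
  let selected : PySem.Set Int :=
    (PySem.List.enumerate lines 0).foldl
      (fun s p =>
        if keywords.any (fun k => PySem.Str.isIn k p.2) then
          (PySem.List.pyRange (max 0 (p.1 - context)) (min (lines.length : Int) (p.1 + context + 1)) 1).foldl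
            PySem.Set.add s
        else s)
      PySem.Set.empty
  if selected = [] then ""
  else
    -- every index in selected is provably 0 ≤ i < len lines, so pyGetD is exact for lines[i]
    PySem.Str.join "\n"
      ((PySem.List.sorted selected (fun x => x) false).map (fun i => PySem.List.pyGetD lines i ""))

-- ===== PORT B =====
def extract_log_evidence_py_alt (log_text : String) (keywords : List String) (context : Int) : String :=
  let lines := PySem.Str.splitlines log_text
  let flags := lines.map (fun line => keywords.any (fun k => PySem.Str.isIn k line))
  let kept := (PySem.List.enumerate lines 0).filterMap
    (fun p =>
      if (PySem.List.slice flags (some (max 0 (p.1 - context))) (some (max 0 (p.1 + context + 1)))).any (fun b => b)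
      then some p.2 else none)
  PySem.Str.join "\n" kept

-- ===== PRECONDITION & SPEC =====
def Spec_extract_log_evidence_py (log_text : String) (keywords : List String) (context : Int) (out : String) : Prop := out = extract_log_evidence_py_alt log_text keywords context
instance (log_text : String) (keywords : List String) (context : Int) (out : String) : Decidable (Spec_extract_log_evidence_py log_text keywords context out) := by unfold Spec_extract_log_evidence_py; infer_instance

-- ===== CLAIM (what is proved, stated in full; the proofs are below) =====
def Claim_equal_extract_log_evidence_py : Prop := ∀ (log_text : String) (keywords : List String) (context : Int), Dom_extract_log_evidence_py log_text keywords context → Spec_extract_log_evidence_py log_text keywords context (extract_log_evidence_py log_text keywords context)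

-- ===== LEMMAS AND PROOFS =====

-- filterMap with an if-some-none body is filter-then-map
theorem pv_filterMap_ite {α β : Type} (l : List α) (p : α → Bool) (f : α → β) :
    l.filterMap (fun a => if p a then some (f a) else none) = (l.filter p).map f := by
  induction l with
  | nil => rfl
  | cons x xs ih => by_cases h : p x <;> simp [h, ih]

-- membership in A's accumulated set of indices
theorem pv_mem_selected (c n : Int) (kw : List String)
    (ps : List (Int × String)) (s : PySem.Set Int) (x : Int) :
    x ∈ ps.foldl
      (fun s p =>
        if kw.any (fun k => PySem.Str.isIn k p.2) then
          (PySem.List.pyRange (max 0 (p.1 - c)) (min n (p.1 + c + 1)) 1).foldl PySem.Set.add s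
        else s) s ↔
    x ∈ s ∨ ∃ p ∈ ps, kw.any (fun k => PySem.Str.isIn k p.2) = true ∧
      max 0 (p.1 - c) ≤ x ∧ x < min n (p.1 + c + 1) := by
  induction ps generalizing s with
  | nil => simp
  | cons q qs ih =>
      simp only [List.foldl_cons]
      by_cases h : kw.any (fun k => PySem.Str.isIn k q.2) = true
      · rw [ih]
        have : ∀ (t : PySem.Set Int),
            x ∈ (PySem.List.pyRange (max 0 (q.1 - c)) (min n (q.1 + c + 1)) 1).foldl PySem.Set.add t ↔
            x ∈ t ∨ (max 0 (q.1 - c) ≤ x ∧ x < min n (q.1 + c + 1)) := by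
          intro t
          have := PySem.Set.mem_foldl_add (l := PySem.List.pyRange (max 0 (q.1 - c)) (min n (q.1 + c + 1)) 1)
            (f := fun b => b) (s := t) (y := x)
          simp only [PySem.List.mem_pyRange_one] at this
          simpa using this
        simp only [h, if_true, this]
        constructor
        · rintro (⟨hx | hr⟩ | ⟨p, hp, hm, hr⟩)
          · exact Or.inl hx
          · exact Or.inr ⟨q, by simp, h, hr⟩
          · exact Or.inr ⟨p, by simp [hp], hm, hr⟩
        · rintro (hx | ⟨p, hp, hm, hr⟩)
          · exact Or.inl (Or.inl hx)
          · rcases List.mem_cons.mp hp with rfl | hp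
            · exact Or.inl (Or.inr hr)
            · exact Or.inr ⟨p, hp, hm, hr⟩
      · rw [if_neg h, ih]
        constructor
        · rintro (hx | ⟨p, hp, hm, hr⟩)
          · exact Or.inl hx
          · exact Or.inr ⟨p, List.mem_cons_of_mem _ hp, hm, hr⟩
        · rintro (hx | ⟨p, hp, hm, hr⟩)
          · exact Or.inl hx
          · rcases List.mem_cons.mp hp with rfl | hp
            · exact absurd hm h
            · exact Or.inr ⟨p, hp, hm, hr⟩

-- A's accumulated set is duplicate-free
theorem pv_nodup_selected (c n : Int) (kw : List String)
    (ps : List (Int × String)) (s : PySem.Set Int) (hs : s.Nodup) :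
    (ps.foldl
      (fun s p =>
        if kw.any (fun k => PySem.Str.isIn k p.2) then
          (PySem.List.pyRange (max 0 (p.1 - c)) (min n (p.1 + c + 1)) 1).foldl PySem.Set.add s
        else s) s).Nodup := by
  induction ps generalizing s with
  | nil => exact hs
  | cons q qs ih =>
      simp only [List.foldl_cons]
      apply ih
      by_cases h : kw.any (fun k => PySem.Str.isIn k q.2) = true
      · simp only [h, if_true]
        show (PySem.Set.update s _).Nodup
        exact PySem.Set.nodup_update _ _ hs
      · rw [if_neg h]; exact hs

-- B's window test, in arithmetic form
theorem pv_any_slice_iff (flags : List Bool) (lo hi : Int) (hlo : 0 ≤ lo) (hhi : 0 ≤ hi) :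
    ((PySem.List.slice flags (some lo) (some hi)).any (fun b => b) = true) ↔
    ∃ k : Nat, k < flags.length ∧ lo ≤ (k : Int) ∧ (k : Int) < hi ∧ flags.getD k false = true := by
  rw [PySem.List.slice_toNat flags hlo hhi]
  rw [List.any_eq_true]
  constructor
  · rintro ⟨b, hb, hbt⟩
    rw [List.mem_iff_getElem] at hb
    rcases hb with ⟨i, hi2, hget⟩
    have hlen : i < (flags.drop lo.toNat).length := (List.length_take .. ▸ hi2 : i < _).trans_le (by simp)
    have hi3 : i < hi.toNat - lo.toNat := lt_of_lt_of_le hi2 (by simp [List.length_take])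
    have hfl : lo.toNat + i < flags.length := by
      have := hlen; simp [List.length_drop] at this; omega
    refine ⟨lo.toNat + i, hfl, ?_, ?_, ?_⟩
    · push_cast; omega
    · push_cast; omega
    · rw [List.getElem_take, List.getElem_drop] at hget
      rw [List.getD_eq_getElem _ _ hfl, hget]
      simpa using hbt
  · rintro ⟨k, hk, hlo2, hhi2, hget⟩
    refine ⟨true, ?_, rfl⟩
    rw [List.mem_iff_getElem]
    have h1 : lo.toNat ≤ k := by omega
    have h2 : k < hi.toNat := by omega
    refine ⟨k - lo.toNat, ?_, ?_⟩
    · simp [List.length_take, List.length_drop]; omega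
    · rw [List.getElem_take, List.getElem_drop]
      have : lo.toNat + (k - lo.toNat) = k := by omega
      rw [List.getD_eq_getElem _ _ hk] at hget
      simp only [this]
      exact hget

-- selection criteria of the two programs coincide on each candidate index
theorem pv_cond_iff (lines kw : List String) (c x : Int) :
    (∃ p ∈ PySem.List.enumerate lines 0, kw.any (fun k => PySem.Str.isIn k p.2) = true ∧
      max 0 (p.1 - c) ≤ x ∧ x < min (lines.length : Int) (p.1 + c + 1)) ↔
    ((0 ≤ x ∧ x < (lines.length : Int)) ∧
      ((PySem.List.slice (lines.map (fun line => kw.any (fun k => PySem.Str.isIn k line)))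
        (some (max 0 (x - c))) (some (max 0 (x + c + 1)))).any (fun b => b)) = true) := by
  have hlen : (lines.map (fun line => kw.any (fun k => PySem.Str.isIn k line))).length = lines.length := by
    simp
  have hflag : ∀ (k : Nat) (hk : k < lines.length),
      (lines.map (fun line => kw.any (fun kk => PySem.Str.isIn kk line))).getD k false
        = kw.any (fun kk => PySem.Str.isIn kk lines[k]) := by
    intro k hk
    rw [List.getD_eq_getElem _ _ (by simpa using hk)]
    simp
  rw [pv_any_slice_iff _ _ _ (le_max_left 0 _) (le_max_left 0 _)]
  constructor
  · rintro ⟨p, hp, hm, hb1, hb2⟩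
    rw [PySem.List.mem_enumerate_iff] at hp
    rcases hp with ⟨k, hk, rfl⟩
    simp only [zero_add] at hm hb1 hb2 ⊢
    have hkx1 : max 0 ((k : Int) - c) ≤ x := hb1
    have hkx2 : x < min (lines.length : Int) ((k : Int) + c + 1) := hb2
    have hkn : (k : Int) < (lines.length : Int) := by exact_mod_cast hk
    refine ⟨⟨by omega, by omega⟩, k, by omega, by omega, by omega, ?_⟩
    rw [hflag k hk]; exact hm
  · rintro ⟨⟨hx0, hxn⟩, k, hkf, hlo, hhi, hget⟩
    rw [hlen] at hkf
    rw [hflag k hkf] at hget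
    refine ⟨((k : Int), lines[k]), ?_, hget, ?_, ?_⟩
    · rw [PySem.List.mem_enumerate_iff]
      exact ⟨k, hkf, by simp⟩
    · have : (k : Int) ≥ 0 := by positivity
      omega
    · have hkn : (k : Int) < (lines.length : Int) := by exact_mod_cast hkf
      omega

-- the core: A's output equals B's output, for an arbitrary list of lines
theorem pv_core (lines : List String) (kw : List String) (c : Int) :
    (let selected : PySem.Set Int :=
      (PySem.List.enumerate lines 0).foldl
        (fun s p =>
          if kw.any (fun k => PySem.Str.isIn k p.2) then
            (PySem.List.pyRange (max 0 (p.1 - c)) (min (lines.length : Int) (p.1 + c + 1)) 1).foldl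
              PySem.Set.add s
          else s)
        PySem.Set.empty
    if selected = [] then ""
    else PySem.Str.join "\n"
      ((PySem.List.sorted selected (fun x => x) false).map (fun i => PySem.List.pyGetD lines i ""))) =
    (let flags := lines.map (fun line => kw.any (fun k => PySem.Str.isIn k line))
     PySem.Str.join "\n" ((PySem.List.enumerate lines 0).filterMap
       (fun p =>
         if (PySem.List.slice flags (some (max 0 (p.1 - c))) (some (max 0 (p.1 + c + 1)))).any (fun b => b)
         then some p.2 else none))) := by
  simp only []
  set n : Int := (lines.length : Int) with hn
  set flags := lines.map (fun line => kw.any (fun k => PySem.Str.isIn k line)) with hflags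
  set q : Int → Bool := fun j =>
    (PySem.List.slice flags (some (max 0 (j - c))) (some (max 0 (j + c + 1)))).any (fun b => b) with hq
  set S := (PySem.List.enumerate lines 0).foldl
      (fun s p =>
        if kw.any (fun k => PySem.Str.isIn k p.2) then
          (PySem.List.pyRange (max 0 (p.1 - c)) (min n (p.1 + c + 1)) 1).foldl PySem.Set.add s
        else s) PySem.Set.empty with hS
  -- rewrite B's comprehension as filter-then-map over range(n)
  have hB : (PySem.List.enumerate lines 0).filterMap
      (fun p => if q p.1 then some p.2 else none) =
      ((PySem.List.pyRange 0 n 1).filter q).map (fun j => PySem.List.pyGetD lines j "") := by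
    rw [PySem.List.enumerate_eq_map_pyRange (d := "")]
    rw [List.filterMap_map]
    rw [← pv_filterMap_ite (PySem.List.pyRange 0 (lines.length : Int) 1) q
      (fun j => PySem.List.pyGetD lines j "")]
    rfl
  -- membership in A's set coincides with B's filtered range
  have hmem : ∀ x : Int, x ∈ S ↔ x ∈ (PySem.List.pyRange 0 n 1).filter q := by
    intro x
    rw [hS, pv_mem_selected]
    rw [List.mem_filter, PySem.List.mem_pyRange_one]
    have := pv_cond_iff lines kw c x
    constructor
    · rintro (hx | hx)
      · simp [PySem.Set.empty] at hx
      · rcases this.mp hx with ⟨⟨h0, h1⟩, hq'⟩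
        exact ⟨⟨h0, h1⟩, hq'⟩
    · rintro ⟨⟨h0, h1⟩, hq'⟩
      exact Or.inr (this.mpr ⟨⟨h0, h1⟩, hq'⟩)
  have hnodupS : S.Nodup := by
    rw [hS]; exact pv_nodup_selected c n kw _ _ List.nodup_nil
  have hnodupF : ((PySem.List.pyRange 0 n 1).filter q).Nodup :=
    (PySem.List.nodup_pyRange_one 0 n).filter q
  by_cases hSnil : S = []
  · rw [if_pos hSnil, hB]
    have : (PySem.List.pyRange 0 n 1).filter q = [] := by
      rw [List.eq_nil_iff_forall_not_mem]
      intro x hx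
      have := (hmem x).mpr hx
      rw [hSnil] at this
      simp at this
    rw [this]
    rfl
  · rw [if_neg hSnil, hB]
    congr 1
    have hsorted : PySem.List.sorted S (fun x => x) false = (PySem.List.pyRange 0 n 1).filter q := by
      apply PySem.List.sorted_eq_of_perm_of_pairwise_lt
      · exact (List.perm_ext_iff_of_nodup hnodupF hnodupS).mpr (fun x => (hmem x).symm)
      · exact (PySem.List.pairwise_lt_pyRange_one 0 n).filter q
    rw [hsorted]

-- ===== VERDICT (by name: the statement is the Claim_ definition above) =====
theorem extract_log_evidence_py_spec : Claim_equal_extract_log_evidence_py := by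
  intro log_text keywords context _
  show extract_log_evidence_py log_text keywords context = extract_log_evidence_py_alt log_text keywords context
  unfold extract_log_evidence_py extract_log_evidence_py_alt
  exact pv_core (PySem.Str.splitlines log_text) keywords context
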